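-- pv_equiv track=rewrite | github.com/yehoon17/programmers | python/Level 2/모두_0으로_만들기.py | solution
-- ===== SOURCE A (Python) =====
-- from collections import deque
--
-- def solution(a, edges):
--     if not sum(a) == 0:
--         return -1
--
--     answer = 0
--     size = len(a)
--     tree = [[0 for _ in range(size)] for _ in range(size)]
--     for x,y in edges:
--         tree[x][y] = 1
--         tree[y][x] = 1
--
--     bfs = deque([i for i in range(size) if sum(tree[i]) == 1])
--     visited=[False for _ in range(size)]
--
--     while(bfs):
--         i = bfs.popleft()
--         visited[i]=True
--         temp = [j for j in range(size) if tree[i][j]==1]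
--         j=-1
--         for x in temp:
--             if not visited[x]:
--                 j = x
--                 break
--         if j<0:
--             break
--         a[j]+=a[i]
--         answer+=a[i]
--         temp=[]
--         for k in range(size):
--             if tree[j][k] == 1:
--                 if not visited[k]:
--                     temp.append(k)
--         if len(temp) == 1:
--             bfs.append(temp[0])
--
--     return answer
-- ===== SOURCE B (Python) =====
-- from collections import deque
--
-- def solution(a, edges):
--     if sum(a) != 0:
--         return -1
--     n = len(a)
--     nb = [set() for _ in range(n)]
--     for x, y in edges:
--         nb[x].add(y)
--         nb[y].add(x)
--     adj = [sorted(s) for s in nb]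
--     # phase 1: purely structural peel -- record (child, parent) events, touch neither a nor a total
--     queue = deque(i for i in range(n) if len(adj[i]) == 1)
--     visited = [False] * n
--     events = []
--     while queue:
--         i = queue.popleft()
--         visited[i] = True
--         j = next((x for x in adj[i] if not visited[x]), -1)
--         if j < 0:
--             break
--         events.append((i, j))
--         rest = [k for k in adj[j] if not visited[k]]
--         if len(rest) == 1:
--             queue.append(rest[0])
--     # phase 2: backward pass computing, for each event, the linear coefficient its child's
--     # original value contributes to the total (value flows: stays at i and is copied into j)
--     ans = 0
--     coef = {}
--     for i, j in reversed(events):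
--         t = 1 + coef.get(j, 0)
--         ans += a[i] * t
--         coef[i] = coef.get(i, 0) + t
--     return ans
-- ===== Notes on version B (the rewrite author's own statement) =====
-- stated objective: alternative
-- what changed: B never mutates a and keeps no running total: it peels the graph purely structurally over sorted per-vertex adjacency lists built from the edges, recording a (child,parent) event list, and then computes the answer in one backward pass over the events that assigns each child the linear coefficient with which its ORIGINAL value enters the total (a coefficient dictionary), instead of A's n-by-n matrix with O(n) row scans and in-place accumulation a[j]+=a[i] / answer+=a[i].
-- outside the precondition, e.g. on solution([1, -1], [(-1, 0)]): A returns 1, B returns 0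
import Mathlib
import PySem

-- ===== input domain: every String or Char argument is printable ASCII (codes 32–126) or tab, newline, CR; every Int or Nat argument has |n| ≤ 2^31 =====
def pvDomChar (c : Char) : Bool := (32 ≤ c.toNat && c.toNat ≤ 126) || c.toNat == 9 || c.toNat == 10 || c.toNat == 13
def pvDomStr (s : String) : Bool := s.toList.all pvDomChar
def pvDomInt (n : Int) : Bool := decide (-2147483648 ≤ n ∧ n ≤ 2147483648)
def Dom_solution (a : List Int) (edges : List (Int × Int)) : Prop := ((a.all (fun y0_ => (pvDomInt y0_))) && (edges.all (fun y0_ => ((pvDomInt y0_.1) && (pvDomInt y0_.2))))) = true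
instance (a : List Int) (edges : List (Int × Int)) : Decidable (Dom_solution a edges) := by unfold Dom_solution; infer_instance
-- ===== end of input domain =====

-- B replaces A's n×n matrix scans with in-place accumulation (a[j]+=a[i], answer+=a[i]) by a
-- structural peel over sorted adjacency lists that only records (child,parent) events, followed
-- by a backward pass giving each child's ORIGINAL value its linear coefficient in the total.
-- A mutates the caller's list `a` in place; B does not — the equivalence is about the return value.

-- ===== PORT A =====
-- 'j = -1; for x in temp: if not visited[x]: j = x; break'
def solFirstUnvisited (visited : List Bool) : List Int → Int
  | [] => -1
  | x :: xs => if !(PySem.List.pyGetD visited x false) then x else solFirstUnvisited visited xs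

-- body of 'for x,y in edges: tree[x][y] = 1; tree[y][x] = 1'
def solEdgeA (t : List (List Int)) (p : Int × Int) : List (List Int) :=
  let t := PySem.List.pySetD t p.1 (PySem.List.pySetD (PySem.List.pyGetD t p.1 []) p.2 1)
  PySem.List.pySetD t p.2 (PySem.List.pySetD (PySem.List.pyGetD t p.2 []) p.1 1)

-- the 'while(bfs)' loop; fuel only bounds the iteration count (the queue pops one element per
-- iteration and appends at most one, so 2*(size+1)^2 iterations are never reached)
def solLoopA (tree : List (List Int)) (size : Nat) : Nat → List Int → List Int → List Bool → Int → Int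
  | 0, _, _, _, ans => ans
  | fuel+1, bfs, a, vis, ans =>
    match bfs with
    | [] => ans
    | i :: rest =>
      let vis := PySem.List.pySetD vis i true
      let temp := (PySem.List.pyRange 0 (size : Int) 1).filter
        (fun j => PySem.List.pyGetD (PySem.List.pyGetD tree i []) j 0 == 1)
      let j := solFirstUnvisited vis temp
      if j < 0 then ans
      else
        let a := PySem.List.pySetD a j (PySem.List.pyGetD a j 0 + PySem.List.pyGetD a i 0)
        let ans := ans + PySem.List.pyGetD a i 0
        let temp2 := (PySem.List.pyRange 0 (size : Int) 1).foldl
          (fun acc k => if PySem.List.pyGetD (PySem.List.pyGetD tree j []) k 0 == 1 then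
              (if !(PySem.List.pyGetD vis k false) then acc ++ [k] else acc) else acc) []
        let bfs' := if temp2.length == 1 then rest ++ [PySem.List.pyGetD temp2 0 0] else rest
        solLoopA tree size fuel bfs' a vis ans

def solution (a : List Int) (edges : List (Int × Int)) : Int :=
  if !(a.sum == 0) then -1
  else
    let size := a.length
    let tree : List (List Int) := (PySem.List.pyRange 0 (size : Int) 1).map
        (fun _ => (PySem.List.pyRange 0 (size : Int) 1).map (fun _ => (0 : Int)))
    let tree := edges.foldl solEdgeA tree
    let bfs := (PySem.List.pyRange 0 (size : Int) 1).filter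
        (fun i => (PySem.List.pyGetD tree i []).sum == 1)
    let vis := (PySem.List.pyRange 0 (size : Int) 1).map (fun _ => false)
    solLoopA tree size (2*(size+1)*(size+1)) bfs a vis 0

-- ===== PORT B =====
-- body of 'for x,y in edges: nb[x].add(y); nb[y].add(x)'
def solEdgeB (s : List (List Int)) (p : Int × Int) : List (List Int) :=
  let s := PySem.List.pySetD s p.1 (PySem.Set.add (PySem.List.pyGetD s p.1 []) p.2)
  PySem.List.pySetD s p.2 (PySem.Set.add (PySem.List.pyGetD s p.2 []) p.1)

-- phase 1, 'while queue': purely structural peel recording the (child, parent) events in order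
-- ('events.append' becomes the cons at the recursive call); same fuel bound as A's loop
def solLoopBEv (adj : List (List Int)) : Nat → List Int → List Bool → List (Int × Int)
  | 0, _, _ => []
  | fuel+1, bfs, vis =>
    match bfs with
    | [] => []
    | i :: rest =>
      let vis := PySem.List.pySetD vis i true
      -- 'j = next((x for x in adj[i] if not visited[x]), -1)'
      let j := ((PySem.List.pyGetD adj i []).find? (fun x => !(PySem.List.pyGetD vis x false))).getD (-1)
      if j < 0 then []
      else
        let restL := (PySem.List.pyGetD adj j []).filter (fun k => !(PySem.List.pyGetD vis k false))
        let bfs' := if restL.length == 1 then rest ++ [PySem.List.pyGetD restL 0 0] else rest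
        (i, j) :: solLoopBEv adj fuel bfs' vis

-- phase 2, body of 'for i, j in reversed(events)': t = 1 + coef.get(j, 0); ans += a[i]*t;
-- coef[i] = coef.get(i, 0) + t   (event indices come from range(n), so a[i] is in range)
def solCoefStep (a : List Int) (st : Int × PySem.Dict Int Int) (e : Int × Int) : Int × PySem.Dict Int Int :=
  let t := 1 + st.2.getD e.2 0
  (st.1 + PySem.List.pyGetD a e.1 0 * t, st.2.insert e.1 (st.2.getD e.1 0 + t))

def solution_alt (a : List Int) (edges : List (Int × Int)) : Int :=
  if !(a.sum == 0) then -1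
  else
    let n := a.length
    let nb : List (List Int) := (PySem.List.pyRange 0 (n : Int) 1).map (fun _ => PySem.Set.empty)
    let nb := edges.foldl solEdgeB nb
    let adj := nb.map (fun s => PySem.List.sorted s (fun x => x) false)
    let bfs := (PySem.List.pyRange 0 (n : Int) 1).filter
        (fun i => (PySem.List.pyGetD adj i []).length == 1)
    let vis := List.replicate n false
    let events := solLoopBEv adj (2*(n+1)*(n+1)) bfs vis
    (events.reverse.foldl (solCoefStep a) (0, PySem.Dict.empty)).1

-- ===== PRECONDITION & SPEC =====
-- Pre_ excludes inputs where sum(a) == 0 and some edge endpoint lies outside [0, len(a)):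
-- for endpoints beyond ±len(a) A raises IndexError, and for negative in-range endpoints A's
-- value rests on Python's negative-index wraparound silently relabelling vertices — an
-- unspecified corner for a graph on vertices 0..n-1, where B labels vertices literally.
def Pre_solution (a : List Int) (edges : List (Int × Int)) : Prop :=
  a.sum ≠ 0 ∨ ∀ p ∈ edges, 0 ≤ p.1 ∧ p.1 < (a.length : Int) ∧ 0 ≤ p.2 ∧ p.2 < (a.length : Int)
instance (a : List Int) (edges : List (Int × Int)) : Decidable (Pre_solution a edges) := by
  unfold Pre_solution; infer_instance

def pvWitness_solution : List Int × (List (Int × Int)) := ([1, -1], [(0, 1)])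

def Spec_solution (a : List Int) (edges : List (Int × Int)) (out : Int) : Prop := out = solution_alt a edges
instance (a : List Int) (edges : List (Int × Int)) (out : Int) : Decidable (Spec_solution a edges out) := by
  unfold Spec_solution; infer_instance

-- ===== CLAIM (what is proved, stated in full; the proofs are below) =====
def Claim_equal_solution : Prop := ∀ (a : List Int) (edges : List (Int × Int)),
  Dom_solution a edges → Pre_solution a edges → Spec_solution a edges (solution a edges)

-- ===== LEMMAS AND PROOFS =====

-- A's matrix row ↔ B's neighbour set: the invariant carried through the edge fold
def SolRowOK (n : Nat) (r : List Int) : Prop := r.length = n ∧ ∀ v ∈ r, v = 0 ∨ v = 1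

def SolInv (n : Nat) (t nb : List (List Int)) : Prop :=
  t.length = n ∧ nb.length = n ∧ (∀ r ∈ t, SolRowOK n r) ∧
  ∀ k : Nat, k < n →
    (nb.getD k []).Nodup ∧
    ∀ j : Int, (j ∈ nb.getD k []) ↔ (0 ≤ j ∧ j < (n : Int) ∧ (t.getD k []).getD j.toNat 0 = 1)

lemma solNext_eq_first (vis : List Bool) (l : List Int) :
    ((l.find? (fun x => !(PySem.List.pyGetD vis x false))).getD (-1)) = solFirstUnvisited vis l := by
  induction l with
  | nil => rfl
  | cons x xs ih =>
    by_cases h : !(PySem.List.pyGetD vis x false) <;>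
      simp [h, solFirstUnvisited, ih]

lemma solFirst_mem (vis : List Bool) (l : List Int) :
    solFirstUnvisited vis l = -1 ∨
      (solFirstUnvisited vis l ∈ l ∧ PySem.List.pyGetD vis (solFirstUnvisited vis l) false = false) := by
  induction l with
  | nil => exact Or.inl rfl
  | cons x xs ih =>
    by_cases h : !(PySem.List.pyGetD vis x false)
    · refine Or.inr ⟨by simp [solFirstUnvisited, h], ?_⟩
      simp only [solFirstUnvisited, h, if_pos]
      simpa using h
    · rcases ih with h1 | h1
      · exact Or.inl (by simp [solFirstUnvisited, h, h1])
      · exact Or.inr ⟨by simp [solFirstUnvisited, h, h1.1], by simp [solFirstUnvisited, h, h1.2]⟩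

lemma solFoldl_nested_if (l : List Int) (p q : Int → Bool) (acc : List Int) :
    l.foldl (fun acc k => if p k then (if q k then acc ++ [k] else acc) else acc) acc
      = acc ++ l.filter (fun k => p k && q k) := by
  induction l generalizing acc with
  | nil => simp
  | cons x xs ih =>
    by_cases hp : p x <;> by_cases hq : q x <;>
      simp [List.foldl_cons, hp, hq, ih]

lemma sol_sum_eq_countP (r : List Int) (h : ∀ v ∈ r, v = 0 ∨ v = 1) :
    r.sum = (r.countP (fun v => v == 1) : Int) := by
  induction r with
  | nil => simp
  | cons v vs ih =>
    have hv := h v (by simp)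
    have ihs := ih (fun w hw => h w (by simp [hw]))
    rcases hv with hv | hv <;> simp [hv, ihs] ; omega

lemma sol_countP_getD (r : List Int) :
    (List.range r.length).countP (fun k => r.getD k 0 == 1) = r.countP (fun x => x == 1) := by
  induction r using List.reverseRecOn with
  | nil => simp
  | append_singleton r v ih =>
    rw [List.length_append, List.length_singleton, List.range_succ, List.countP_append,
        List.countP_append]
    have h1 : (List.range r.length).countP (fun k => (r ++ [v]).getD k 0 == 1)
        = (List.range r.length).countP (fun k => r.getD k 0 == 1) := by
      apply List.countP_congr
      intro k hk
      rw [List.getD_append _ _ _ _ (List.mem_range.mp hk)]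
    have h2 : (r ++ [v]).getD r.length 0 = v := by
      rw [List.getD_append_right _ _ _ _ (le_refl r.length)]; simp
    rw [h1, ih, List.countP_singleton, List.countP_singleton, h2]

lemma sol_len_filter_eq_countP (r : List Int) :
    ((PySem.List.pyRange 0 (r.length : Int) 1).filter
      (fun j => PySem.List.pyGetD r j 0 == 1)).length = r.countP (fun v => v == 1) := by
  rw [PySem.List.pyRange_one, List.filter_map, List.length_map,
      ← List.countP_eq_length_filter, ← sol_countP_getD r]
  apply List.countP_congr
  intro k hk
  simp [Function.comp, PySem.List.pyGetD_natCast]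

lemma sol_getD_set {α : Type} (l : List α) (i j : Nat) (v d : α) (hj : j < l.length) :
    (l.set i v).getD j d = if i = j then v else l.getD j d := by
  rw [List.getD_eq_getElem _ _ (by simpa using hj), List.getElem_set]
  split
  · rfl
  · rw [List.getD_eq_getElem _ _ hj]

lemma sol_pyGetD_getD {α : Type} (l : List α) (i : Int) (d : α) (h0 : 0 ≤ i)
    (h1 : i.toNat < l.length) : PySem.List.pyGetD l i d = l.getD i.toNat d := by
  rw [PySem.List.pyGetD_eq_getElem l d h0 (by omega), List.getD_eq_getElem _ _ h1]

lemma sol_rowOK_set (n : Nat) (r : List Int) (m : Nat) (h : SolRowOK n r) :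
    SolRowOK n (r.set m 1) :=
  ⟨by simp [h.1], fun v hv => (List.mem_or_eq_of_mem_set hv).elim (h.2 v) Or.inr⟩

lemma sol_rowOK_getD (n : Nat) (t : List (List Int)) (ht : t.length = n)
    (hrow : ∀ r ∈ t, SolRowOK n r) (k : Nat) (hk : k < n) : SolRowOK n (t.getD k []) := by
  rw [List.getD_eq_getElem _ _ (by omega)]
  exact hrow _ (List.getElem_mem _)

lemma sol_inv_step (n : Nat) (t nb : List (List Int)) (x y : Int)
    (hx : 0 ≤ x ∧ x < (n : Int)) (hy : 0 ≤ y ∧ y < (n : Int)) (h : SolInv n t nb) :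
    SolInv n (solEdgeA t (x, y)) (solEdgeB nb (x, y)) := by
  obtain ⟨ht, hnb, hrow, hmem⟩ := h
  obtain ⟨xn, rfl⟩ : ∃ m : Nat, (m : Int) = x := ⟨x.toNat, by omega⟩
  obtain ⟨yn, rfl⟩ : ∃ m : Nat, (m : Int) = y := ⟨y.toNat, by omega⟩
  have hxn' : xn < n := by omega
  have hyn' : yn < n := by omega
  have htn : ∀ m : Nat, ((m : Int)).toNat = m := fun m => Int.toNat_natCast m
  -- rewrite the A step into List.set form
  have hA : solEdgeA t ((xn : Int), (yn : Int))
      = (t.set xn ((t.getD xn []).set yn 1)).set yn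
          (((t.set xn ((t.getD xn []).set yn 1)).getD yn []).set xn 1) := by
    show PySem.List.pySetD
        (PySem.List.pySetD t (xn : Int) (PySem.List.pySetD (PySem.List.pyGetD t (xn : Int) []) (yn : Int) 1)) (yn : Int)
        (PySem.List.pySetD
          (PySem.List.pyGetD (PySem.List.pySetD t (xn : Int) (PySem.List.pySetD (PySem.List.pyGetD t (xn : Int) []) (yn : Int) 1)) (yn : Int) []) (xn : Int) 1)
      = _
    rw [sol_pyGetD_getD t (xn : Int) [] (by omega) (by omega),
        PySem.List.pySetD_of_nonneg _ _ (by omega : (0:Int) ≤ (yn : Int)),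
        PySem.List.pySetD_of_nonneg _ _ (by omega : (0:Int) ≤ (xn : Int)),
        PySem.List.pySetD_of_nonneg _ _ (by omega : (0:Int) ≤ (yn : Int)),
        sol_pyGetD_getD _ (yn : Int) [] (by omega) (by simp [htn, ht]; omega),
        PySem.List.pySetD_of_nonneg _ _ (by omega : (0:Int) ≤ (xn : Int))]
    simp [htn]
  have hB : solEdgeB nb ((xn : Int), (yn : Int))
      = (nb.set xn (PySem.Set.add (nb.getD xn []) (yn : Int))).set yn
          (PySem.Set.add ((nb.set xn (PySem.Set.add (nb.getD xn []) (yn : Int))).getD yn []) (xn : Int)) := by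
    show PySem.List.pySetD
        (PySem.List.pySetD nb (xn : Int) (PySem.Set.add (PySem.List.pyGetD nb (xn : Int) []) (yn : Int))) (yn : Int)
        (PySem.Set.add
          (PySem.List.pyGetD (PySem.List.pySetD nb (xn : Int) (PySem.Set.add (PySem.List.pyGetD nb (xn : Int) []) (yn : Int))) (yn : Int) []) (xn : Int))
      = _
    rw [sol_pyGetD_getD nb (xn : Int) [] (by omega) (by omega),
        PySem.List.pySetD_of_nonneg _ _ (by omega : (0:Int) ≤ (xn : Int)),
        sol_pyGetD_getD _ (yn : Int) [] (by omega) (by simp [htn, hnb]; omega),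
        PySem.List.pySetD_of_nonneg _ _ (by omega : (0:Int) ≤ (yn : Int))]
    simp [htn]
  rw [hA, hB]
  generalize hrxdef : (t.getD xn []).set yn 1 = rx at *
  generalize hsxdef : PySem.Set.add (nb.getD xn []) (yn : Int) = sx at *
  have ht1yn : (t.set xn rx).getD yn [] = if xn = yn then rx else t.getD yn [] :=
    sol_getD_set t xn yn rx [] (by omega)
  have hnb1yn : (nb.set xn sx).getD yn [] = if xn = yn then sx else nb.getD yn [] :=
    sol_getD_set nb xn yn sx [] (by omega)
  generalize hrydef : ((t.set xn rx).getD yn []).set xn 1 = ry at *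
  generalize hsydef : PySem.Set.add ((nb.set xn sx).getD yn []) (xn : Int) = sy at *
  have hrowxn := sol_rowOK_getD n t ht hrow xn hxn'
  have hrowyn := sol_rowOK_getD n t ht hrow yn hyn'
  have hrownx : SolRowOK n rx := hrxdef ▸ sol_rowOK_set n _ yn hrowxn
  have hlen1 : ((t.set xn rx).getD yn []).length = n := by
    rw [ht1yn]; split_ifs
    · exact hrownx.1
    · exact hrowyn.1
  have hry : SolRowOK n ry := by
    rw [← hrydef, ht1yn]
    split_ifs
    · exact sol_rowOK_set n _ xn hrownx
    · exact sol_rowOK_set n _ xn hrowyn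
  have hTk : ∀ k, k < n → ((t.set xn rx).set yn ry).getD k []
      = if yn = k then ry else if xn = k then rx else t.getD k [] := by
    intro k hk
    rw [sol_getD_set _ yn k ry [] (by simp [ht]; omega), sol_getD_set t xn k rx [] (by omega)]
  have hNBk : ∀ k, k < n → ((nb.set xn sx).set yn sy).getD k []
      = if yn = k then sy else if xn = k then sx else nb.getD k [] := by
    intro k hk
    rw [sol_getD_set _ yn k sy [] (by simp [hnb]; omega), sol_getD_set nb xn k sx [] (by omega)]
  have hTmem : ∀ k, k < n → ∀ jn : Nat, jn < n →
      ((((t.set xn rx).set yn ry).getD k []).getD jn 0 = 1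
        ↔ ((k = xn ∧ jn = yn) ∨ (k = yn ∧ jn = xn) ∨ (t.getD k []).getD jn 0 = 1)) := by
    intro k hk jn hjn
    rw [hTk k hk]
    by_cases h1 : yn = k
    · subst h1
      rw [if_pos rfl, ← hrydef, sol_getD_set _ xn jn 1 0 (by omega), ht1yn]
      by_cases hxy : xn = yn
      · subst hxy
        rw [if_pos rfl, ← hrxdef, sol_getD_set _ xn jn 1 0 (by rw [hrowxn.1]; omega)]
        split_ifs <;> constructor <;> intro hh <;> tauto
      · rw [if_neg hxy]
        split_ifs <;> constructor <;> intro hh <;> tauto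
    · rw [if_neg h1]
      by_cases h2 : xn = k
      · subst h2
        rw [if_pos rfl, ← hrxdef, sol_getD_set _ yn jn 1 0 (by rw [hrowxn.1]; omega)]
        split_ifs <;> constructor <;> intro hh <;> tauto
      · rw [if_neg h2]
        constructor <;> intro hh <;> tauto
  have hNBmem : ∀ k, k < n → ∀ j : Int,
      (j ∈ ((nb.set xn sx).set yn sy).getD k []
        ↔ ((k = xn ∧ j = (yn : Int)) ∨ (k = yn ∧ j = (xn : Int)) ∨ j ∈ nb.getD k [])) := by
    intro k hk j
    rw [hNBk k hk]
    by_cases h1 : yn = k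
    · subst h1
      rw [if_pos rfl, ← hsydef, PySem.Set.mem_add, hnb1yn]
      by_cases hxy : xn = yn
      · subst hxy
        rw [if_pos rfl, ← hsxdef, PySem.Set.mem_add]
        constructor <;> intro hh <;> tauto
      · rw [if_neg hxy]
        constructor <;> intro hh <;> tauto
    · rw [if_neg h1]
      by_cases h2 : xn = k
      · subst h2
        rw [if_pos rfl, ← hsxdef, PySem.Set.mem_add]
        constructor <;> intro hh <;> tauto
      · rw [if_neg h2]
        constructor <;> intro hh <;> tauto
  refine ⟨by simp [ht], by simp [hnb], ?_, ?_⟩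
  · intro r hr
    rcases List.mem_or_eq_of_mem_set hr with hr1 | rfl
    · rcases List.mem_or_eq_of_mem_set hr1 with hr2 | rfl
      · exact hrow _ hr2
      · exact hrownx
    · exact hry
  · intro k hk
    constructor
    · rw [hNBk k hk]
      have hnodx : sx.Nodup := hsxdef ▸ PySem.Set.nodup_add _ _ (hmem xn hxn').1
      have hnody : sy.Nodup := by
        rw [← hsydef]
        apply PySem.Set.nodup_add
        rw [hnb1yn]
        split_ifs
        · exact hnodx
        · exact (hmem yn hyn').1
      split_ifs
      · exact hnody
      · exact hnodx
      · exact (hmem k hk).1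
    · intro j
      rw [hNBmem k hk j]
      by_cases hjb : 0 ≤ j ∧ j < (n : Int)
      · rw [(hmem k hk).2 j, hTmem k hk j.toNat (by omega)]
        have e1 : (j = (yn : Int)) ↔ (j.toNat = yn) := by omega
        have e2 : (j = (xn : Int)) ↔ (j.toNat = xn) := by omega
        omega
      · constructor
        · rintro (⟨hk1, rfl⟩ | ⟨hk1, rfl⟩ | hjm)
          · exact absurd ⟨by omega, by omega⟩ hjb
          · exact absurd ⟨by omega, by omega⟩ hjb
          · exact absurd ⟨((hmem k hk).2 j |>.mp hjm).1, ((hmem k hk).2 j |>.mp hjm).2.1⟩ hjb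
        · rintro ⟨hj0, hjn, _⟩
          exact absurd ⟨hj0, hjn⟩ hjb

lemma sol_inv_fold (n : Nat) (edges : List (Int × Int)) (t nb : List (List Int))
    (hb : ∀ p ∈ edges, 0 ≤ p.1 ∧ p.1 < (n : Int) ∧ 0 ≤ p.2 ∧ p.2 < (n : Int))
    (h : SolInv n t nb) :
    SolInv n (edges.foldl solEdgeA t) (edges.foldl solEdgeB nb) := by
  induction edges generalizing t nb with
  | nil => exact h
  | cons p ps ih =>
    have hp := hb p (by simp)
    have := sol_inv_step n t nb p.1 p.2 ⟨hp.1, hp.2.1⟩ ⟨hp.2.2.1, hp.2.2.2⟩ h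
    exact ih _ _ (fun q hq => hb q (List.mem_cons_of_mem _ hq)) this

lemma sol_inv_init (n : Nat) :
    SolInv n ((PySem.List.pyRange 0 (n : Int) 1).map
        (fun _ => (PySem.List.pyRange 0 (n : Int) 1).map (fun _ => (0 : Int))))
      ((PySem.List.pyRange 0 (n : Int) 1).map (fun _ => PySem.Set.empty)) := by
  have hlen : (PySem.List.pyRange 0 (n : Int) 1).length = n := by
    rw [PySem.List.length_pyRange_one]; simp
  refine ⟨by simp [hlen], by simp [hlen], ?_, ?_⟩
  · intro r hr
    rcases List.mem_map.mp hr with ⟨_, _, rfl⟩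
    refine ⟨by simp [hlen], ?_⟩
    intro v hv
    rcases List.mem_map.mp hv with ⟨_, _, rfl⟩
    exact Or.inl rfl
  · intro k hk
    have h1 : ((PySem.List.pyRange 0 (n : Int) 1).map
        (fun _ => (PySem.Set.empty : PySem.Set Int))).getD k [] = [] := by
      rw [List.map_const', List.getD_eq_getElem _ _ (by simp [hlen]; omega)]
      simp [PySem.Set.empty]
    have h2 : ((PySem.List.pyRange 0 (n : Int) 1).map
        (fun _ => (PySem.List.pyRange 0 (n : Int) 1).map (fun _ => (0 : Int)))).getD k []
        = (PySem.List.pyRange 0 (n : Int) 1).map (fun _ => (0 : Int)) := by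
      rw [List.map_const', List.getD_eq_getElem _ _ (by simp [hlen]; omega)]
      simp
    refine ⟨by rw [h1]; exact List.nodup_nil, ?_⟩
    intro j
    rw [h1, h2, List.map_const']
    constructor
    · intro hj; simp at hj
    · rintro ⟨hj0, hjn, hrow⟩
      exfalso
      rw [List.getD_eq_getElem?_getD, List.getElem?_replicate] at hrow
      split at hrow <;> simp_all

lemma sol_adj_of_inv (n : Nat) (t nb : List (List Int)) (h : SolInv n t nb)
    (i : Int) (h0 : 0 ≤ i) (h1 : i < (n : Int)) :
    PySem.List.pyGetD (nb.map (fun s => PySem.List.sorted s (fun x => x) false)) i []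
      = (PySem.List.pyRange 0 (n : Int) 1).filter
          (fun j => PySem.List.pyGetD (PySem.List.pyGetD t i []) j 0 == 1) := by
  obtain ⟨ht, hnb, hrow, hmem⟩ := h
  obtain ⟨iN, rfl⟩ : ∃ m : Nat, (m : Int) = i := ⟨i.toNat, by omega⟩
  have hiN : iN < n := by omega
  have hrowlen : (t.getD iN []).length = n := (sol_rowOK_getD n t ht hrow iN hiN).1
  have hrowget : PySem.List.pyGetD t (iN : Int) [] = t.getD iN [] :=
    sol_pyGetD_getD t _ [] (by omega) (by simp; omega)
  have hL : PySem.List.pyGetD (nb.map (fun s => PySem.List.sorted s (fun x => x) false)) (iN : Int) []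
      = PySem.List.sorted (nb.getD iN []) (fun x => x) false := by
    rw [sol_pyGetD_getD _ _ _ (by omega) (by simp [hnb]; omega), Int.toNat_natCast,
        List.getD_eq_getElem _ _ (by simp [hnb]; omega), List.getElem_map,
        List.getD_eq_getElem _ _ (by omega)]
  rw [hL]
  apply PySem.List.sorted_eq_of_perm_of_pairwise_lt
  · rw [List.perm_ext_iff_of_nodup
      (((PySem.List.pairwise_lt_pyRange_one 0 (n : Int)).filter _).imp ne_of_lt)
      (hmem iN hiN).1]
    intro a
    rw [List.mem_filter, PySem.List.mem_pyRange_one, (hmem iN hiN).2 a]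
    constructor
    · rintro ⟨⟨ha0, han⟩, hap⟩
      refine ⟨ha0, han, ?_⟩
      rw [hrowget, sol_pyGetD_getD _ _ _ ha0 (by omega)] at hap
      exact beq_iff_eq.mp hap
    · rintro ⟨ha0, han, hrv⟩
      refine ⟨⟨ha0, han⟩, ?_⟩
      rw [hrowget, sol_pyGetD_getD _ _ _ ha0 (by omega)]
      exact beq_iff_eq.mpr hrv
  · exact (PySem.List.pairwise_lt_pyRange_one 0 (n : Int)).filter _

-- ---- the value A accumulates, expressed as a replay of B's event list ----

-- replay of A's arithmetic over the recorded events (a[j]+=a[i]; ans+=a[i])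
def solReplay : List (Int × Int) → List Int → Int
  | [], _ => 0
  | (i, j) :: es, a =>
    let a' := PySem.List.pySetD a j (PySem.List.pyGetD a j 0 + PySem.List.pyGetD a i 0)
    PySem.List.pyGetD a' i 0 + solReplay es a'

-- linear coefficient of the value currently sitting at position v over the remaining events
def solK : List (Int × Int) → Int → Int
  | [], _ => 0
  | (i, j) :: es, v => if v = i then 1 + solK es j + solK es i else solK es v

-- events produced by the structural loop are in range and have child ≠ parent
def SolEvOK (n : Nat) (es : List (Int × Int)) : Prop :=
  ∀ e ∈ es, 0 ≤ e.1 ∧ e.1 < (n : Int) ∧ 0 ≤ e.2 ∧ e.2 < (n : Int) ∧ e.1 ≠ e.2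

lemma sol_ev_ok (adj tree : List (List Int)) (n : Nat)
    (hadj : ∀ i : Int, 0 ≤ i → i < (n : Int) →
      PySem.List.pyGetD adj i [] =
        (PySem.List.pyRange 0 (n : Int) 1).filter
          (fun j => PySem.List.pyGetD (PySem.List.pyGetD tree i []) j 0 == 1)) :
    ∀ (fuel : Nat) (bfs : List Int) (vis : List Bool),
      vis.length = n → (∀ x ∈ bfs, 0 ≤ x ∧ x < (n : Int)) →
      SolEvOK n (solLoopBEv adj fuel bfs vis) := by
  intro fuel
  induction fuel with
  | zero => intro bfs vis _ _ e he; simp [solLoopBEv] at he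
  | succ f ih =>
    intro bfs vis hv hb
    rcases bfs with _ | ⟨i, rest⟩
    · intro e he; simp [solLoopBEv] at he
    · have hi := hb i List.mem_cons_self
      rw [solLoopBEv]
      simp only []
      rw [solNext_eq_first]
      set vis' := PySem.List.pySetD vis i true with hvis'
      have hvlen : vis'.length = n := by
        rw [hvis', PySem.List.pySetD_of_nonneg _ _ hi.1, List.length_set, hv]
      set j := solFirstUnvisited vis' (PySem.List.pyGetD adj i []) with hj
      by_cases hjneg : j < 0
      · rw [if_pos hjneg]; intro e he; simp at he
      · rw [if_neg hjneg]
        rcases solFirst_mem vis' (PySem.List.pyGetD adj i []) with hfu | hfu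
        · exact absurd (hj ▸ hfu ▸ (by norm_num : (-1 : Int) < 0)) hjneg
        have hjmem : j ∈ PySem.List.pyGetD adj i [] := hfu.1
        rw [hadj i hi.1 hi.2] at hjmem
        have hjb := PySem.List.mem_pyRange_one.mp (List.mem_filter.mp hjmem).1
        have hvi : PySem.List.pyGetD vis' i false = true := by
          rw [hvis', PySem.List.pySetD_of_nonneg _ _ hi.1,
              sol_pyGetD_getD _ _ _ hi.1 (by rw [List.length_set, hv]; omega),
              sol_getD_set _ _ _ _ _ (by rw [hv]; omega), if_pos rfl]
        have hij : i ≠ j := fun hh => by rw [hh, hfu.2] at hvi; exact Bool.false_ne_true hvi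
        set restL := (PySem.List.pyGetD adj j []).filter
          (fun k => !(PySem.List.pyGetD vis' k false)) with hrestL
        have htmem : ∀ w ∈ restL, 0 ≤ w ∧ w < (n : Int) := by
          intro w hwmem
          have h5 := List.mem_filter.mp (hrestL ▸ hwmem)
          have hwr := h5.1
          rw [hadj j hjb.1 hjb.2] at hwr
          have h6 := PySem.List.mem_pyRange_one.mp (List.mem_filter.mp hwr).1
          exact ⟨h6.1, h6.2⟩
        have hb' : ∀ z ∈ (if (restL.length == 1) = true then rest ++ [PySem.List.pyGetD restL 0 0] else rest),
            0 ≤ z ∧ z < (n : Int) := by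
          split_ifs with hl
          · intro z hz
            rcases List.mem_append.mp hz with hz1 | hz1
            · exact hb z (List.mem_cons_of_mem _ hz1)
            · have hz2 : z = PySem.List.pyGetD restL 0 0 := by simpa using hz1
              obtain ⟨w, hw⟩ := List.length_eq_one_iff.mp (by simpa using hl)
              have hw0 : PySem.List.pyGetD restL 0 0 = w := by
                rw [hw, PySem.List.pyGetD_zero_cons]
              rw [hz2, hw0]
              exact htmem w (hw ▸ List.mem_cons_self)
          · intro z hz; exact hb z (List.mem_cons_of_mem _ hz)
        intro e he
        rcases List.mem_cons.mp he with rfl | he1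
        · exact ⟨hi.1, hi.2, hjb.1, hjb.2, hij⟩
        · exact ih _ vis' hvlen hb' e he1

-- A's loop equals its starting total plus the replay of B's event list
lemma sol_loop_replay (tree adj : List (List Int)) (n : Nat)
    (hadj : ∀ i : Int, 0 ≤ i → i < (n : Int) →
      PySem.List.pyGetD adj i [] =
        (PySem.List.pyRange 0 (n : Int) 1).filter
          (fun j => PySem.List.pyGetD (PySem.List.pyGetD tree i []) j 0 == 1)) :
    ∀ (fuel : Nat) (bfs a : List Int) (vis : List Bool) (ans : Int),
      (∀ x ∈ bfs, 0 ≤ x ∧ x < (n : Int)) →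
      solLoopA tree n fuel bfs a vis ans = ans + solReplay (solLoopBEv adj fuel bfs vis) a := by
  intro fuel
  induction fuel with
  | zero => intro bfs a vis ans _; simp [solLoopA, solLoopBEv, solReplay]
  | succ f ih =>
    intro bfs a vis ans hb
    rcases bfs with _ | ⟨i, rest⟩
    · simp [solLoopA, solLoopBEv, solReplay]
    · have hi := hb i List.mem_cons_self
      rw [solLoopA, solLoopBEv]
      simp only []
      rw [solNext_eq_first, hadj i hi.1 hi.2]
      set vis' := PySem.List.pySetD vis i true with hvis'
      set temp := (PySem.List.pyRange 0 (n : Int) 1).filter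
        (fun j => PySem.List.pyGetD (PySem.List.pyGetD tree i []) j 0 == 1) with htemp
      set j := solFirstUnvisited vis' temp with hj
      by_cases hjneg : j < 0
      · rw [if_pos hjneg, if_pos hjneg, solReplay]; omega
      · rw [if_neg hjneg, if_neg hjneg]
        have hjmem : j ∈ temp := by
          rcases solFirst_mem vis' temp with hfu | hfu
          · exact absurd (hj ▸ hfu ▸ (by norm_num : (-1 : Int) < 0)) hjneg
          · exact hj ▸ hfu.1
        have hjb : 0 ≤ j ∧ j < (n : Int) := by
          have := PySem.List.mem_pyRange_one.mp (List.mem_filter.mp (htemp ▸ hjmem)).1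
          exact ⟨this.1, this.2⟩
        have htempeq : (PySem.List.pyRange 0 (n : Int) 1).foldl
            (fun acc k => if PySem.List.pyGetD (PySem.List.pyGetD tree j []) k 0 == 1 then
              (if !(PySem.List.pyGetD vis' k false) then acc ++ [k] else acc) else acc) []
            = (PySem.List.pyGetD adj j []).filter (fun k => !(PySem.List.pyGetD vis' k false)) := by
          rw [solFoldl_nested_if, List.nil_append, hadj j hjb.1 hjb.2, List.filter_filter]
          exact List.filter_congr (fun k _ => Bool.and_comm _ _)
        rw [htempeq]
        set restL := (PySem.List.pyGetD adj j []).filter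
          (fun k => !(PySem.List.pyGetD vis' k false)) with hrestL
        have htmem : ∀ w ∈ restL, 0 ≤ w ∧ w < (n : Int) := by
          intro w hwmem
          have h5 := List.mem_filter.mp (hrestL ▸ hwmem)
          have hwr := h5.1
          rw [hadj j hjb.1 hjb.2] at hwr
          have h6 := PySem.List.mem_pyRange_one.mp (List.mem_filter.mp hwr).1
          exact ⟨h6.1, h6.2⟩
        set a' := PySem.List.pySetD a j (PySem.List.pyGetD a j 0 + PySem.List.pyGetD a i 0) with ha'
        by_cases hl : restL.length = 1
        · rw [if_pos (by simpa using hl : (restL.length == 1) = true)]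
          have hb' : ∀ z ∈ rest ++ [PySem.List.pyGetD restL 0 0], 0 ≤ z ∧ z < (n : Int) := by
            intro z hz
            rcases List.mem_append.mp hz with hz1 | hz1
            · exact hb z (List.mem_cons_of_mem _ hz1)
            · have hz2 : z = PySem.List.pyGetD restL 0 0 := by simpa using hz1
              obtain ⟨w, hw⟩ := List.length_eq_one_iff.mp hl
              have hw0 : PySem.List.pyGetD restL 0 0 = w := by
                rw [hw, PySem.List.pyGetD_zero_cons]
              rw [hz2, hw0]
              exact htmem w (hw ▸ List.mem_cons_self)
          rw [ih _ a' vis' _ hb', solReplay]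
          simp only [← ha']
          omega
        · rw [if_neg (by simpa using hl : ¬ (restL.length == 1) = true)]
          rw [ih _ a' vis' _ (fun z hz => hb z (List.mem_cons_of_mem _ hz)), solReplay]
          simp only [← ha']
          omega

-- one replay step in List.set / List.getD form
lemma sol_replay_cons (i j : Int) (es : List (Int × Int)) (a : List Int)
    (hi0 : 0 ≤ i) (hi1 : i.toNat < a.length) (hj0 : 0 ≤ j) (hj1 : j.toNat < a.length) :
    solReplay ((i, j) :: es) a
      = (a.set j.toNat (a.getD j.toNat 0 + a.getD i.toNat 0)).getD i.toNat 0
        + solReplay es (a.set j.toNat (a.getD j.toNat 0 + a.getD i.toNat 0)) := by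
  show PySem.List.pyGetD (PySem.List.pySetD a j (PySem.List.pyGetD a j 0 + PySem.List.pyGetD a i 0)) i 0
      + solReplay es (PySem.List.pySetD a j (PySem.List.pyGetD a j 0 + PySem.List.pyGetD a i 0)) = _
  rw [PySem.List.pySetD_of_nonneg _ _ hj0,
      sol_pyGetD_getD a j 0 hj0 hj1, sol_pyGetD_getD a i 0 hi0 hi1,
      sol_pyGetD_getD _ i 0 hi0 (by rw [List.length_set]; exact hi1)]

-- linearity: adding d at position v adds d * (its coefficient) to the replayed total
lemma sol_replay_lin (n : Nat) (es : List (Int × Int)) (hok : SolEvOK n es) :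
    ∀ (a : List Int), a.length = n → ∀ (vN : Nat), vN < n → ∀ (d : Int),
      solReplay es (a.set vN (a.getD vN 0 + d)) = solReplay es a + d * solK es (vN : Int) := by
  induction es with
  | nil => intro a _ vN _ d; simp [solReplay, solK]
  | cons e es ih =>
    intro a ha vN hvN d
    obtain ⟨i, j⟩ := e
    have he := hok (i, j) List.mem_cons_self
    have hok' : SolEvOK n es := fun e he' => hok e (List.mem_cons_of_mem _ he')
    obtain ⟨iN, rfl⟩ : ∃ m : Nat, (m : Int) = i := ⟨i.toNat, by omega⟩
    obtain ⟨jN, rfl⟩ : ∃ m : Nat, (m : Int) = j := ⟨j.toNat, by omega⟩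
    have hiN : iN < n := by omega
    have hjN : jN < n := by omega
    have hij : iN ≠ jN := fun hh => he.2.2.2.2 (by rw [hh])
    rw [sol_replay_cons _ _ _ a (by omega) (by simp [ha]; omega) (by omega) (by simp [ha]; omega),
        sol_replay_cons _ _ _ (a.set vN (a.getD vN 0 + d)) (by omega)
          (by simp [List.length_set, ha]; omega) (by omega) (by simp [List.length_set, ha]; omega)]
    simp only [Int.toNat_natCast]
    by_cases hvi : vN = iN
    · subst hvi
      have hgj : (a.set vN (a.getD vN 0 + d)).getD jN 0 = a.getD jN 0 :=
        (sol_getD_set a vN jN _ 0 (by omega)).trans (if_neg hij)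
      have hgi : (a.set vN (a.getD vN 0 + d)).getD vN 0 = a.getD vN 0 + d :=
        (sol_getD_set a vN vN _ 0 (by omega)).trans (if_pos rfl)
      rw [hgj, hgi]
      have harr : (a.set vN (a.getD vN 0 + d)).set jN (a.getD jN 0 + (a.getD vN 0 + d))
          = (a.set jN (a.getD jN 0 + a.getD vN 0 + d)).set vN (a.getD vN 0 + d) := by
        rw [show a.getD jN 0 + (a.getD vN 0 + d) = a.getD jN 0 + a.getD vN 0 + d from by ring]
        exact List.set_comm _ _ hij
      rw [harr]
      have s2 := ih hok' (a.set jN (a.getD jN 0 + a.getD vN 0 + d)) (by rw [List.length_set, ha]) vN hvN d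
      have e3 : (a.set jN (a.getD jN 0 + a.getD vN 0 + d)).getD vN 0 = a.getD vN 0 :=
        (sol_getD_set a jN vN _ 0 (by omega)).trans (if_neg (Ne.symm hij))
      rw [e3] at s2
      rw [s2]
      have s1 := ih hok' (a.set jN (a.getD jN 0 + a.getD vN 0)) (by rw [List.length_set, ha]) jN hjN d
      have e1 : (a.set jN (a.getD jN 0 + a.getD vN 0)).getD jN 0 = a.getD jN 0 + a.getD vN 0 :=
        (sol_getD_set a jN jN _ 0 (by omega)).trans (if_pos rfl)
      rw [e1, List.set_set] at s1
      rw [s1]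
      rw [(sol_getD_set (a.set jN (a.getD jN 0 + a.getD vN 0 + d)) vN vN _ 0
            (by rw [List.length_set, ha]; omega)).trans (if_pos rfl)]
      rw [(sol_getD_set a jN vN _ 0 (by omega)).trans (if_neg (Ne.symm hij))]
      rw [solK, if_pos rfl]
      ring
    · by_cases hvj : vN = jN
      · subst hvj
        have hgi : (a.set vN (a.getD vN 0 + d)).getD iN 0 = a.getD iN 0 :=
          (sol_getD_set a vN iN _ 0 (by omega)).trans (if_neg (fun hh => hvi hh))
        have hgj : (a.set vN (a.getD vN 0 + d)).getD vN 0 = a.getD vN 0 + d :=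
          (sol_getD_set a vN vN _ 0 (by omega)).trans (if_pos rfl)
        rw [hgi, hgj]
        have harr : (a.set vN (a.getD vN 0 + d)).set vN (a.getD vN 0 + d + a.getD iN 0)
            = (a.set vN (a.getD vN 0 + a.getD iN 0)).set vN
                ((a.set vN (a.getD vN 0 + a.getD iN 0)).getD vN 0 + d) := by
          rw [(sol_getD_set a vN vN _ 0 (by omega)).trans (if_pos rfl),
              List.set_set, List.set_set]
          congr 1
          ring
        rw [harr]
        rw [ih hok' (a.set vN (a.getD vN 0 + a.getD iN 0)) (by rw [List.length_set, ha]) vN hvN d]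
        have eL : ((a.set vN (a.getD vN 0 + a.getD iN 0)).set vN
              ((a.set vN (a.getD vN 0 + a.getD iN 0)).getD vN 0 + d)).getD iN 0 = a.getD iN 0 := by
          rw [List.set_set]
          exact (sol_getD_set a vN iN _ 0 (by omega)).trans (if_neg (fun hh => hvi hh))
        rw [eL]
        rw [(sol_getD_set a vN iN _ 0 (by omega)).trans (if_neg (fun hh => hvi hh))]
        rw [solK, if_neg (by omega : ((vN : Nat) : Int) ≠ ((iN : Nat) : Int))]
        ring
      · have hgi : (a.set vN (a.getD vN 0 + d)).getD iN 0 = a.getD iN 0 :=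
          (sol_getD_set a vN iN _ 0 (by omega)).trans (if_neg (fun hh => hvi hh))
        have hgj : (a.set vN (a.getD vN 0 + d)).getD jN 0 = a.getD jN 0 :=
          (sol_getD_set a vN jN _ 0 (by omega)).trans (if_neg (fun hh => hvj hh))
        rw [hgi, hgj]
        have harr : (a.set vN (a.getD vN 0 + d)).set jN (a.getD jN 0 + a.getD iN 0)
            = (a.set jN (a.getD jN 0 + a.getD iN 0)).set vN
                ((a.set jN (a.getD jN 0 + a.getD iN 0)).getD vN 0 + d) := by
          rw [(sol_getD_set a jN vN _ 0 (by omega)).trans (if_neg (fun hh => hvj hh.symm))]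
          exact List.set_comm _ _ hvj
        rw [harr]
        rw [ih hok' (a.set jN (a.getD jN 0 + a.getD iN 0)) (by rw [List.length_set, ha]) vN hvN d]
        have eL : ((a.set jN (a.getD jN 0 + a.getD iN 0)).set vN
              ((a.set jN (a.getD jN 0 + a.getD iN 0)).getD vN 0 + d)).getD iN 0 = a.getD iN 0 := by
          rw [(sol_getD_set (a.set jN (a.getD jN 0 + a.getD iN 0)) vN iN _ 0
                (by rw [List.length_set, ha]; omega)).trans (if_neg (fun hh => hvi hh))]
          exact (sol_getD_set a jN iN _ 0 (by omega)).trans (if_neg (Ne.symm hij))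
        rw [eL]
        rw [(sol_getD_set a jN iN _ 0 (by omega)).trans (if_neg (Ne.symm hij))]
        rw [solK, if_neg (by omega : ((vN : Nat) : Int) ≠ ((iN : Nat) : Int))]
        ring

-- closed form of the replay: each child's ORIGINAL value times (1 + coefficient of its parent)
def solF : List (Int × Int) → List Int → Int
  | [], _ => 0
  | (i, j) :: es, a => PySem.List.pyGetD a i 0 * (1 + solK es j) + solF es a

lemma sol_replay_eq_F (n : Nat) (es : List (Int × Int)) (hok : SolEvOK n es) :
    ∀ (a : List Int), a.length = n → solReplay es a = solF es a := by
  induction es with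
  | nil => intro a _; rfl
  | cons e es ih =>
    intro a ha
    obtain ⟨i, j⟩ := e
    have he := hok (i, j) List.mem_cons_self
    have hok' : SolEvOK n es := fun e he' => hok e (List.mem_cons_of_mem _ he')
    obtain ⟨iN, rfl⟩ : ∃ m : Nat, (m : Int) = i := ⟨i.toNat, by omega⟩
    obtain ⟨jN, rfl⟩ : ∃ m : Nat, (m : Int) = j := ⟨j.toNat, by omega⟩
    have hij : iN ≠ jN := fun hh => he.2.2.2.2 (by rw [hh])
    rw [sol_replay_cons _ _ _ a (by omega) (by omega) (by omega) (by omega)]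
    simp only [Int.toNat_natCast]
    have h1len : (a.set jN (a.getD jN 0 + a.getD iN 0)).length = n := by rw [List.length_set, ha]
    have hstep : solReplay es (a.set jN (a.getD jN 0 + a.getD iN 0))
        = solReplay es a + a.getD iN 0 * solK es (jN : Int) :=
      sol_replay_lin n es hok' a ha jN (by omega) (a.getD iN 0)
    rw [hstep, ih hok' a ha, solF]
    rw [(sol_getD_set a jN iN _ 0 (by omega)).trans (if_neg (Ne.symm hij)),
        sol_pyGetD_getD a (iN : Int) 0 (by omega) (by rw [Int.toNat_natCast, ha]; omega),
        Int.toNat_natCast]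
    ring

-- the backward coefficient pass computes exactly solF / solK
lemma sol_fold_spec (a : List Int) (es : List (Int × Int)) :
    (es.foldr (fun e st => solCoefStep a st e) ((0 : Int), (PySem.Dict.empty : PySem.Dict Int Int))).1
        = solF es a
      ∧ ∀ v : Int, (es.foldr (fun e st => solCoefStep a st e)
          ((0 : Int), (PySem.Dict.empty : PySem.Dict Int Int))).2.getD v 0 = solK es v := by
  induction es with
  | nil =>
    constructor
    · rfl
    · intro v; simp [solK, PySem.Dict.getD, PySem.Dict.get?, PySem.Dict.empty]
  | cons e es ih =>
    obtain ⟨i, j⟩ := e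
    obtain ⟨ih1, ih2⟩ := ih
    rw [List.foldr_cons]
    constructor
    · show (es.foldr (fun e st => solCoefStep a st e) _).1
          + PySem.List.pyGetD a i 0 * (1 + (es.foldr (fun e st => solCoefStep a st e) _).2.getD j 0)
          = solF ((i, j) :: es) a
      rw [ih1, ih2, solF]
      ring
    · intro v
      show ((es.foldr (fun e st => solCoefStep a st e) _).2.insert i
          ((es.foldr (fun e st => solCoefStep a st e) _).2.getD i 0
            + (1 + (es.foldr (fun e st => solCoefStep a st e) _).2.getD j 0))).getD v 0
          = solK ((i, j) :: es) v
      rw [PySem.Dict.getD_insert, ih2, ih2, solK]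
      split_ifs with hv
      · ring
      · exact ih2 v

-- ===== VERDICT (by name: the statement is the Claim_ definition above) =====
theorem solution_spec : Claim_equal_solution := by
  unfold Claim_equal_solution
  intro a edges hdom hpre
  unfold Spec_solution solution solution_alt
  by_cases hs : a.sum = 0
  · have hcond : ¬((!(a.sum == 0)) = true) := by simp [hs]
    rw [if_neg hcond, if_neg hcond]
    have hval : ∀ p ∈ edges, 0 ≤ p.1 ∧ p.1 < (a.length : Int) ∧ 0 ≤ p.2 ∧ p.2 < (a.length : Int) := by
      rcases hpre with h | h
      · exact absurd hs h
      · exact h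
    have hinv := sol_inv_fold a.length edges _ _ hval (sol_inv_init a.length)
    set n := a.length with hn
    set T := edges.foldl solEdgeA ((PySem.List.pyRange 0 (n : Int) 1).map
        (fun _ => (PySem.List.pyRange 0 (n : Int) 1).map (fun _ => (0 : Int)))) with hT
    set NB := edges.foldl solEdgeB ((PySem.List.pyRange 0 (n : Int) 1).map
        (fun _ => (PySem.Set.empty : PySem.Set Int))) with hNB
    have hadj := sol_adj_of_inv n T NB hinv
    obtain ⟨htl, hnbl, hrows, hmems⟩ := hinv
    show solLoopA T n (2*(n+1)*(n+1))
        ((PySem.List.pyRange 0 (n : Int) 1).filter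
          (fun i => (PySem.List.pyGetD T i []).sum == 1))
        a ((PySem.List.pyRange 0 (n : Int) 1).map (fun _ => false)) 0
      = (((solLoopBEv (NB.map (fun s => PySem.List.sorted s (fun x => x) false)) (2*(n+1)*(n+1))
          ((PySem.List.pyRange 0 (n : Int) 1).filter
            (fun i => (PySem.List.pyGetD (NB.map (fun s => PySem.List.sorted s (fun x => x) false)) i []).length == 1))
          (List.replicate n false)).reverse).foldl (solCoefStep a) (0, PySem.Dict.empty)).1
    have hvis : (PySem.List.pyRange 0 (n : Int) 1).map (fun _ => false) = List.replicate n false := by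
      simp [List.map_const', PySem.List.length_pyRange_one]
    have hbfs : (PySem.List.pyRange 0 (n : Int) 1).filter
          (fun i => (PySem.List.pyGetD T i []).sum == 1)
        = (PySem.List.pyRange 0 (n : Int) 1).filter
          (fun i => (PySem.List.pyGetD (NB.map (fun s => PySem.List.sorted s (fun x => x) false)) i []).length == 1) := by
      apply List.filter_congr
      intro i hi
      have hib := PySem.List.mem_pyRange_one.mp hi
      have hiN : i.toNat < n := by omega
      have hrowget : PySem.List.pyGetD T i [] = T.getD i.toNat [] :=
        sol_pyGetD_getD T i [] hib.1 (by omega)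
      have hrOK := sol_rowOK_getD n T htl hrows i.toNat hiN
      have hsum := sol_sum_eq_countP (T.getD i.toNat []) hrOK.2
      have hlenf := sol_len_filter_eq_countP (T.getD i.toNat [])
      rw [hadj i hib.1 hib.2]
      have hfix : (PySem.List.pyRange 0 (n : Int) 1).filter
            (fun j => PySem.List.pyGetD (PySem.List.pyGetD T i []) j 0 == 1)
          = (PySem.List.pyRange 0 ((T.getD i.toNat []).length : Int) 1).filter
            (fun j => PySem.List.pyGetD (T.getD i.toNat []) j 0 == 1) := by
        rw [hrowget, hrOK.1]
      rw [hfix, hrowget]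
      rw [Bool.eq_iff_iff]
      simp only [beq_iff_eq, hsum, hlenf]
      omega
    rw [hvis, hbfs]
    set adjB := NB.map (fun s => PySem.List.sorted s (fun x => x) false) with hadjB
    set bfs0 := (PySem.List.pyRange 0 (n : Int) 1).filter
          (fun i => (PySem.List.pyGetD adjB i []).length == 1) with hbfs0
    have hbbound : ∀ x ∈ bfs0, 0 ≤ x ∧ x < (n : Int) := by
      intro x hx
      have := PySem.List.mem_pyRange_one.mp (List.mem_filter.mp hx).1
      exact ⟨this.1, this.2⟩
    set ev := solLoopBEv adjB (2*(n+1)*(n+1)) bfs0 (List.replicate n false) with hev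
    have hok : SolEvOK n ev :=
      sol_ev_ok adjB T n hadj _ bfs0 _ (by simp) hbbound
    rw [sol_loop_replay T adjB n hadj _ bfs0 a _ 0 hbbound, zero_add, ← hev]
    rw [sol_replay_eq_F n ev hok a rfl]
    rw [List.foldl_reverse]
    exact (sol_fold_spec a ev).1.symm
  · have hcond : ((!(a.sum == 0)) = true) := by simp [hs]
    rw [if_pos hcond, if_pos hcond]
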